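-- pv_equiv track=rewrite | github.com/pymongo/python_leetcode | easy/minimum_deletion_cost_to_avoid_repeating_letters.py | f
-- ===== SOURCE A (Python) =====
-- from typing import List
--
-- def f(s: str, cost: List[int]) -> int:
--     n = len(cost)
--     if n <= 1:
--         return 0
--     res = 0
--     i = 1
--     while i < n:
--         if s[i] == s[i - 1]:
--             j = i
--             # 找到连续的一片重复字母
--             while j < n and s[j] == s[j - 1]:
--                 j += 1
--             res += sum(cost[i - 1:j]) - max(cost[i - 1:j])
--             i = j
--         else:
--             i += 1
--     return res
-- ===== SOURCE B (Python) =====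
-- from typing import List
--
-- def f(s: str, cost: List[int]) -> int:
--     res = 0
--     prev = 0
--     prev_ch = None
--     for ch, c in zip(s, cost):
--         if ch == prev_ch:
--             res += min(prev, c)
--             prev = max(prev, c)
--         else:
--             prev = c
--         prev_ch = ch
--     return res
-- ===== Notes on version B (the rewrite author's own statement) =====
-- stated objective: simpler
-- what changed: Replaces A's outer index loop with an inner group-delimiting scan plus sum/max over slices by one flat pass over zip(s, cost) that keeps a running maximum of the current run and adds min(prev, c) at each repeat; no indexing or slicing.
import Mathlib
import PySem

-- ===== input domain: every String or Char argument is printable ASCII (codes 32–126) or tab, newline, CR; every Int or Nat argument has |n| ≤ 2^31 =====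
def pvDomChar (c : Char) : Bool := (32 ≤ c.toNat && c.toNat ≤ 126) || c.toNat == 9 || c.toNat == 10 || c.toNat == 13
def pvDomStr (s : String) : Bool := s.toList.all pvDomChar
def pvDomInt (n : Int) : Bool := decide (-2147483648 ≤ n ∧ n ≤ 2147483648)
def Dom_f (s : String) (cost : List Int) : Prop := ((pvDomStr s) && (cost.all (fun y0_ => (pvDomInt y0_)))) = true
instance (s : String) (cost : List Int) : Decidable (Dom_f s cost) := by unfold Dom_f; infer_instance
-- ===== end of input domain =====

-- B replaces A's group-delimiting inner scan and sum/max over slices by a single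
-- flat pass over zip(s, cost) keeping a running maximum of the current run (simpler).

-- ===== PORT A =====
-- inner `while j < n and s[j] == s[j-1]: j += 1`; fuel ≥ n - j suffices.
-- s[j] is ported as getD (exact inside Pre_f, where every index is in range).
def fInner (cs : List Char) (n : Nat) : Nat → Nat → Nat
  | 0, j => j
  | fuel+1, j =>
    if j < n ∧ cs.getD j ' ' = cs.getD (j-1) ' ' then fInner cs n fuel (j+1) else j

-- outer `while i < n`; i increases by at least 1 each iteration, so fuel n suffices.
def fOuter (cs : List Char) (cost : List Int) (n : Nat) : Nat → Nat → Int → Int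
  | 0, _, res => res
  | fuel+1, i, res =>
    if i < n then
      if cs.getD i ' ' = cs.getD (i-1) ' ' then
        let j := fInner cs n (n - i) i
        let seg := PySem.List.slice cost (some ((i : Int) - 1)) (some (j : Int))
        fOuter cs cost n fuel j
          (res + (seg.sum - (PySem.List.max? seg (fun y => y)).getD 0))
      else fOuter cs cost n fuel (i+1) res
    else res

def f (s : String) (cost : List Int) : Int :=
  let n := cost.length
  if n ≤ 1 then 0 else fOuter s.toList cost n n 1 0

-- ===== PORT B =====
def f_alt (s : String) (cost : List Int) : Int :=
  ((List.zip s.toList cost).foldl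
    (fun (st : Int × Int × Option Char) p =>
      if some p.1 = st.2.2 then (st.1 + min st.2.1 p.2, max st.2.1 p.2, some p.1)
      else (st.1, p.2, some p.1)) (0, 0, none)).1

-- ===== PRECONDITION & SPEC =====
-- Pre_f excludes exactly the inputs where A raises IndexError: 2 ≤ len(cost) and len(s) < len(cost).
def Pre_f (s : String) (cost : List Int) : Prop :=
  cost.length ≤ 1 ∨ cost.length ≤ s.toList.length
instance (s : String) (cost : List Int) : Decidable (Pre_f s cost) := by
  unfold Pre_f; infer_instance
def pvWitness_f : String × List Int := ("aab", [1, 2, 3])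

def Spec_f (s : String) (cost : List Int) (out : Int) : Prop := out = f_alt s cost
instance (s : String) (cost : List Int) (out : Int) : Decidable (Spec_f s cost out) := by unfold Spec_f; infer_instance

-- ===== CLAIM (what is proved, stated in full; the proofs are below) =====
def Claim_equal_f : Prop := ∀ (s : String) (cost : List Int), Dom_f s cost → Pre_f s cost → Spec_f s cost (f s cost)

-- ===== LEMMAS AND PROOFS =====

-- B's fold, with the result accumulator split off.
def gRun : Option Char → Int → List (Char × Int) → Int
  | _, _, [] => 0
  | pc, prev, (c, v) :: rest =>
    if some c = pc then min prev v + gRun (some c) (max prev v) rest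
    else gRun (some c) v rest

-- the per-run contribution, as B computes it
def runS : Int → List Int → Int
  | _, [] => 0
  | prev, v :: vs => min prev v + runS (max prev v) vs

theorem foldB (l : List (Char × Int)) : ∀ (res prev : Int) (pc : Option Char),
    ((l.foldl
      (fun (st : Int × Int × Option Char) p =>
        if some p.1 = st.2.2 then (st.1 + min st.2.1 p.2, max st.2.1 p.2, some p.1)
        else (st.1, p.2, some p.1)) (res, prev, pc)).1) = res + gRun pc prev l := by
  induction l with
  | nil => intro res prev pc; simp [gRun]
  | cons hd tl ih =>
    intro res prev pc
    obtain ⟨c, v⟩ := hd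
    by_cases h : some c = pc
    · simp only [List.foldl_cons, gRun, if_pos h, ih]; ring
    · simp only [List.foldl_cons, gRun, if_neg h, ih]

theorem sumMax (vs : List Int) : ∀ v0 : Int, (v0 :: vs).sum - vs.foldl max v0 = runS v0 vs := by
  induction vs with
  | nil => intro v0; simp [runS]
  | cons v t ih =>
    intro v0
    have h := ih (max v0 v)
    simp only [List.sum_cons] at h ⊢
    simp only [runS, List.foldl_cons]
    have : min v0 v + max v0 v = v0 + v := min_add_max v0 v
    omega

theorem gRun_prev_irrel (c : Char) (p q : Int) (rest : List (Char × Int))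
    (h : rest = [] ∨ ∀ d v t, rest = (d, v) :: t → d ≠ c) :
    gRun (some c) p rest = gRun (some c) q rest := by
  match rest with
  | [] => rfl
  | (d, v) :: t =>
    have hd : d ≠ c := by
      rcases h with h | h
      · cases h
      · exact h d v t rfl
    have : ¬ (some d = some c) := by simpa using hd
    simp [gRun, this]

theorem drop_zip_cons (cs : List Char) (cost : List Int) (i : Nat)
    (hi : i < cost.length) (hlen : cost.length ≤ cs.length) :
    (cs.zip cost).drop i = (cs.getD i ' ', cost.getD i 0) :: (cs.zip cost).drop (i+1) := by
  have hzl : (cs.zip cost).length = cost.length := by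
    simp [List.length_zip]; omega
  have hiz : i < (cs.zip cost).length := by omega
  have hic : i < cs.length := by omega
  rw [List.drop_eq_getElem_cons hiz]
  congr 1
  have : (cs.zip cost)[i] = (cs[i], cost[i]) := List.getElem_zip
  rw [this, List.getD_eq_getElem cs ' ' hic, List.getD_eq_getElem cost 0 hi]

theorem drop_zip_nil (cs : List Char) (cost : List Int)
    (hlen : cost.length ≤ cs.length) :
    (cs.zip cost).drop cost.length = [] := by
  apply List.drop_eq_nil_of_le
  rw [List.length_zip]
  omega

theorem fInner_spec (cs : List Char) (n : Nat) : ∀ (fuel j : Nat), j ≤ n → n - j ≤ fuel →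
    j ≤ fInner cs n fuel j ∧ fInner cs n fuel j ≤ n ∧
    (∀ m, j ≤ m → m < fInner cs n fuel j → cs.getD m ' ' = cs.getD (m-1) ' ') ∧
    (fInner cs n fuel j = n ∨ ¬ cs.getD (fInner cs n fuel j) ' ' = cs.getD (fInner cs n fuel j - 1) ' ') := by
  intro fuel
  induction fuel with
  | zero =>
    intro j hj hf
    have : j = n := by omega
    subst this
    exact ⟨le_refl _, le_refl _, fun m h1 h2 => by simp only [fInner] at h2; omega, Or.inl rfl⟩
  | succ fu ih =>
    intro j hj hf
    by_cases hc : j < n ∧ cs.getD j ' ' = cs.getD (j-1) ' '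
    · have hrw : fInner cs n (fu+1) j = fInner cs n fu (j+1) := by
        rw [show fInner cs n (fu+1) j
            = if j < n ∧ cs.getD j ' ' = cs.getD (j-1) ' ' then fInner cs n fu (j+1) else j
          from rfl, if_pos hc]
      obtain ⟨h1, h2, h3, h4⟩ := ih (j+1) (by omega) (by omega)
      rw [hrw]
      refine ⟨by omega, h2, ?_, h4⟩
      intro m hm1 hm2
      rcases Nat.eq_or_lt_of_le hm1 with heq | hlt
      · subst heq; exact hc.2
      · exact h3 m hlt hm2
    · have hrw : fInner cs n (fu+1) j = j := by simp only [fInner, if_neg hc]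
      rw [hrw]
      refine ⟨le_refl _, hj, fun m h1 h2 => absurd h2 (by omega), ?_⟩
      by_cases hjn : j < n
      · right; intro heq; exact hc ⟨hjn, heq⟩
      · left; omega

theorem fInner_step (cs : List Char) (n fu j : Nat)
    (h : j < n ∧ cs.getD j ' ' = cs.getD (j-1) ' ') :
    fInner cs n (fu+1) j = fInner cs n fu (j+1) := by
  rw [show fInner cs n (fu+1) j
      = if j < n ∧ cs.getD j ' ' = cs.getD (j-1) ' ' then fInner cs n fu (j+1) else j
    from rfl, if_pos h]

theorem gRun_seg (cs : List Char) (cost : List Int) (j : Nat)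
    (hjn : j ≤ cost.length) (hlen : cost.length ≤ cs.length) :
    ∀ (d i : Nat) (prev : Int), i + d = j → 1 ≤ i →
    (∀ m, i ≤ m → m < j → cs.getD m ' ' = cs.getD (m-1) ' ') →
    gRun (some (cs.getD (i-1) ' ')) prev ((cs.zip cost).drop i)
      = runS prev ((cost.drop i).take (j - i))
        + gRun (some (cs.getD (j-1) ' ')) (((cost.drop i).take (j - i)).foldl max prev)
            ((cs.zip cost).drop j) := by
  intro d
  induction d with
  | zero =>
    intro i prev hij hi _
    have : i = j := by omega
    subst this
    simp [runS]
  | succ d ih =>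
    intro i prev hij hi hrun
    have hij : i < j := by omega
    have hic : i < cost.length := by omega
    have hchar : cs.getD i ' ' = cs.getD (i-1) ' ' := hrun i (le_refl i) hij
    rw [drop_zip_cons cs cost i hic hlen]
    have hpc : (some (cs.getD i ' ') : Option Char) = some (cs.getD (i-1) ' ') := by rw [hchar]
    simp only [gRun, if_pos hpc]
    have hIH := ih (i+1) (max prev (cost.getD i 0)) (by omega) (by omega)
      (fun m h1 h2 => hrun m (by omega) h2)
    simp only [Nat.add_sub_cancel] at hIH
    rw [hchar] at hIH ⊢
    rw [hIH]
    have hseg : (cost.drop i).take (j - i)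
        = cost.getD i 0 :: (cost.drop (i+1)).take (j - (i+1)) := by
      rw [List.drop_eq_getElem_cons hic, List.getD_eq_getElem cost 0 hic]
      have : j - i = (j - (i+1)) + 1 := by omega
      rw [this, List.take_succ_cons]
    rw [hseg]
    simp only [runS, List.foldl_cons]
    ring

theorem fOuter_spec (cs : List Char) (cost : List Int) (n : Nat)
    (hn : n = cost.length) (hlen : n ≤ cs.length) :
    ∀ (fuel i : Nat) (res : Int), 1 ≤ i → i ≤ n → n - i ≤ fuel →
    fOuter cs cost n fuel i res
      = res + gRun (some (cs.getD (i-1) ' ')) (cost.getD (i-1) 0) ((cs.zip cost).drop i) := by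
  intro fuel
  induction fuel with
  | zero =>
    intro i res h1 h2 h3
    have : i = n := by omega
    subst this
    rw [hn] at hlen ⊢
    rw [drop_zip_nil cs cost hlen]
    simp [fOuter, gRun]
  | succ fu ih =>
    intro i res h1 h2 h3
    by_cases hin : i < n
    · by_cases heq : cs.getD i ' ' = cs.getD (i-1) ' '
      · -- run branch
        have hrw : fOuter cs cost n (fu+1) i res
            = fOuter cs cost n fu (fInner cs n (n - i) i)
                (res + ((PySem.List.slice cost (some ((i : Int) - 1)) (some ((fInner cs n (n - i) i : Nat) : Int))).sum
                  - (PySem.List.max? (PySem.List.slice cost (some ((i : Int) - 1)) (some ((fInner cs n (n - i) i : Nat) : Int))) (fun y => y)).getD 0)) := by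
          simp only [fOuter, if_pos hin, if_pos heq]
        set j := fInner cs n (n - i) i with hjdef
        -- unfold one inner step to get j ≥ i + 1
        have hfu : n - i = (n - i - 1) + 1 := by omega
        have hstep : j = fInner cs n (n - i - 1) (i+1) := by
          rw [hjdef, hfu, fInner_step cs n _ i ⟨hin, heq⟩]
          norm_num
        obtain ⟨hj1, hj2, hj3, hj4⟩ := fInner_spec cs n (n - i - 1) (i+1) (by omega) (by omega)
        rw [← hstep] at hj1 hj2 hj3 hj4
        have hrun : ∀ m, i ≤ m → m < j → cs.getD m ' ' = cs.getD (m-1) ' ' := by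
          intro m hm1 hm2
          rcases Nat.eq_or_lt_of_le hm1 with he | hlt
          · subst he; exact heq
          · exact hj3 m hlt hm2
        -- slice = cost[i-1] :: segT
        have hcast : ((i : Int) - 1) = (((i-1 : Nat) : Int)) := by omega
        have hslice : PySem.List.slice cost (some ((i : Int) - 1)) (some ((j : Nat) : Int))
            = (cost.drop (i-1)).take (j - (i-1)) := by
          rw [hcast, PySem.List.slice_natCast]
        have hi1c : i - 1 < cost.length := by omega
        have hseg : (cost.drop (i-1)).take (j - (i-1))
            = cost.getD (i-1) 0 :: (cost.drop i).take (j - i) := by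
          rw [List.drop_eq_getElem_cons hi1c, List.getD_eq_getElem cost 0 hi1c]
          have h1 : i - 1 + 1 = i := by omega
          have h2 : j - (i-1) = (j - i) + 1 := by omega
          rw [h1, h2, List.take_succ_cons]
        set segT := (cost.drop i).take (j - i) with hsegT
        have hmax : (PySem.List.max? (cost.getD (i-1) 0 :: segT) (fun y => y)).getD 0
            = segT.foldl max (cost.getD (i-1) 0) := by
          rw [PySem.List.max?_id_cons]; rfl
        have hamount : (PySem.List.slice cost (some ((i : Int) - 1)) (some ((j : Nat) : Int))).sum
              - (PySem.List.max? (PySem.List.slice cost (some ((i : Int) - 1)) (some ((j : Nat) : Int))) (fun y => y)).getD 0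
            = runS (cost.getD (i-1) 0) segT := by
          rw [hslice, hseg, hmax, sumMax]
        -- recursive call via IH
        have hrec := ih j (res + runS (cost.getD (i-1) 0) segT) (by omega) hj2 (by omega)
        -- RHS via gRun_seg
        have hrhs := gRun_seg cs cost j (by omega) (by omega) (j - i) i (cost.getD (i-1) 0)
          (by omega) h1 hrun
        rw [← hsegT] at hrhs
        -- prev irrelevance at the run boundary
        have hirrel : gRun (some (cs.getD (j-1) ' ')) (segT.foldl max (cost.getD (i-1) 0)) ((cs.zip cost).drop j)
            = gRun (some (cs.getD (j-1) ' ')) (cost.getD (j-1) 0) ((cs.zip cost).drop j) := by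
          apply gRun_prev_irrel
          by_cases hjn : j = n
          · left
            rw [hjn, hn]
            exact drop_zip_nil cs cost (hn ▸ hlen)
          · right
            intro d v t hdrop hd
            have hjc : j < cost.length := by omega
            rw [drop_zip_cons cs cost j hjc (by omega)] at hdrop
            have hd' : d = cs.getD j ' ' := by
              injection hdrop with h1 _; injection h1 with h1 _; exact h1.symm
            rcases hj4 with h | h
            · exact hjn h
            · exact h (by rw [← hd', hd])
        rw [hrw, hamount, hrec, hrhs, ← hirrel]
        ring
      · -- no repeat at i: step to i+1
        have hrw : fOuter cs cost n (fu+1) i res = fOuter cs cost n fu (i+1) res := by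
          simp only [fOuter, if_pos hin, if_neg heq]
        have hic : i < cost.length := by omega
        rw [hrw, ih (i+1) res (by omega) (by omega) (by omega),
          drop_zip_cons cs cost i hic (by omega)]
        have hpc : ¬ ((some (cs.getD i ' ') : Option Char) = some (cs.getD (i-1) ' ')) := by
          simpa using heq
        simp only [gRun, if_neg hpc, Nat.add_sub_cancel]
    · -- i = n
      have : i = n := by omega
      subst this
      rw [hn] at hlen ⊢
      rw [drop_zip_nil cs cost hlen]
      simp [fOuter, gRun]

-- ===== VERDICT (by name: the statement is the Claim_ definition above) =====
theorem f_spec : Claim_equal_f := by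
  intro s cost _ hpre
  unfold Spec_f f f_alt
  unfold Pre_f at hpre
  rw [foldB]
  show (if cost.length ≤ 1 then (0:Int) else fOuter s.toList cost cost.length cost.length 1 0)
      = 0 + gRun none 0 (List.zip s.toList cost)
  by_cases h1 : cost.length ≤ 1
  · rw [if_pos h1]
    rcases cost with _ | ⟨v, _ | ⟨w, t⟩⟩
    · simp [gRun]
    · rcases hcs : s.toList with _ | ⟨c, cs'⟩
      · simp [gRun]
      · simp [gRun]
    · simp at h1
  · have h2 : 1 < cost.length := by omega
    have hlen : cost.length ≤ s.toList.length := by omega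
    rw [if_neg (by omega)]
    rw [fOuter_spec s.toList cost cost.length rfl hlen cost.length 1 0 (le_refl 1) (by omega) (by omega)]
    conv_rhs => rw [show s.toList.zip cost = List.drop 0 (s.toList.zip cost)
        from List.drop_zero.symm,
      drop_zip_cons s.toList cost 0 (by omega) hlen]
    simp [gRun]
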